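-- pv_equiv track=rewrite | github.com/alecerio/NeuralCasting | compiler/frontend/parser/ops/sub.py | _gen_for_loop_index
-- ===== SOURCE A (Python) =====
-- def _gen_for_loop_index(shape : list[int]) -> str:
--     code : str = ""
--     n_dims : int = len(shape)
--     first : int = n_dims
--     for i in range(n_dims):
--         if shape[i] != 0:
--             first = i
--             break
--     if first == n_dims:
--         return "0"
--     for i in range(first, n_dims):
--         index : str = "i" + str(i)
--         size : int = 1
--         for j in range(i+1, n_dims):
--             size *= shape[j]
--         code += index + "*" + str(size)
--         if i < n_dims-1:
--             code += " + "
--     return code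
-- ===== SOURCE B (Python) =====
-- def _gen_for_loop_index(shape: list[int]) -> str:
--     # One backward pass: suffix products via a running accumulator,
--     # terms collected in reverse, first nonzero index tracked on the way.
--     terms = []
--     acc = 1
--     first = None
--     for i in range(len(shape) - 1, -1, -1):
--         terms.append("i" + str(i) + "*" + str(acc))
--         if shape[i] != 0:
--             first = i
--         acc *= shape[i]
--     if first is None:
--         return "0"
--     terms.reverse()
--     return " + ".join(terms[first:])
-- ===== Notes on version B (the rewrite author's own statement) =====
-- stated objective: faster
-- what changed: Replaces the nested per-index product loop with a single backward pass maintaining a running suffix-product accumulator (also finding the first nonzero index on the way), then joins the collected terms.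
import Mathlib
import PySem

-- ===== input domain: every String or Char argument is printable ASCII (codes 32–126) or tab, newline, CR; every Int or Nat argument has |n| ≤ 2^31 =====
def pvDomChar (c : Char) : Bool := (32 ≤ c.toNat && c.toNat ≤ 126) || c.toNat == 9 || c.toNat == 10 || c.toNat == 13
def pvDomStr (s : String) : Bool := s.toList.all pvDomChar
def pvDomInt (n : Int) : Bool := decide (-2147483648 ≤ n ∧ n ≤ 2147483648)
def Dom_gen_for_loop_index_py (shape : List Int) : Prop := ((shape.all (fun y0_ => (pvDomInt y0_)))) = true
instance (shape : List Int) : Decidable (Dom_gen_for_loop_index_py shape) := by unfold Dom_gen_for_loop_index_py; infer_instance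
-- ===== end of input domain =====

-- B replaces A's quadratic nested product loop by one backward pass with a running
-- suffix-product accumulator; equality of the returned string is proved for all inputs.

-- ===== PORT A =====
-- the first for loop with break: scan elements carrying the index, return n when none is nonzero
def aFirst : List Int → Nat → Nat
  | [], i => i
  | x :: xs, i => if x ≠ 0 then i else aFirst xs (i + 1)

-- inner loop: for j in range(i+1, n): size *= shape[j]
def aProd (shape : List Int) (j n : Nat) (size : Int) : Int :=
  if j < n then aProd shape (j + 1) n (size * shape.getD j 0) else size
termination_by n - j

-- outer loop: for i in range(first, n): code += ...
def aLoop (shape : List Int) (i n : Nat) (code : String) : String :=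
  if i < n then
    let index : String := "i" ++ PySem.Int.toStr (i : Int)
    let size : Int := aProd shape (i + 1) n 1
    let code := code ++ index ++ "*" ++ PySem.Int.toStr size
    let code := if (i : Int) < (n : Int) - 1 then code ++ " + " else code
    aLoop shape (i + 1) n code
  else code
termination_by n - i

def gen_for_loop_index_py (shape : List Int) : String :=
  let n := shape.length
  let first := aFirst shape 0
  if first = n then "0" else aLoop shape first n ""

-- ===== PORT B =====
-- the single backward loop of Source B: processes the list from the right, building
-- (terms in forward order, first nonzero index, running suffix product acc)
def bGo : List Int → Nat → (List String × Option Nat × Int)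
  | [], _ => ([], none, 1)
  | x :: xs, i =>
      let (terms, first, acc) := bGo xs (i + 1)
      (("i" ++ PySem.Int.toStr (i : Int) ++ "*" ++ PySem.Int.toStr acc) :: terms,
       if x ≠ 0 then some i else first,
       acc * x)

-- " + ".join, ported by hand
def joinPlus : List String → String
  | [] => ""
  | [a] => a
  | a :: b :: l => a ++ " + " ++ joinPlus (b :: l)

def gen_for_loop_index_py_alt (shape : List Int) : String :=
  let (terms, first, _) := bGo shape 0
  match first with
  | none => "0"
  | some f => joinPlus (terms.drop f)

-- ===== PRECONDITION & SPEC =====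
def Spec_gen_for_loop_index_py (shape : List Int) (out : String) : Prop := out = gen_for_loop_index_py_alt shape
instance (shape : List Int) (out : String) : Decidable (Spec_gen_for_loop_index_py shape out) := by unfold Spec_gen_for_loop_index_py; infer_instance

-- ===== CLAIM (what is proved, stated in full; the proofs are below) =====
def Claim_equal_gen_for_loop_index_py : Prop := ∀ (shape : List Int), Dom_gen_for_loop_index_py shape → Spec_gen_for_loop_index_py shape (gen_for_loop_index_py shape)

-- ===== LEMMAS AND PROOFS =====

def term (i : Nat) (p : Int) : String :=
  "i" ++ PySem.Int.toStr (i : Int) ++ "*" ++ PySem.Int.toStr p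

def termsOf : List Int → Nat → List String
  | [], _ => []
  | _ :: xs, i => term i xs.prod :: termsOf xs (i + 1)

def firstOf : List Int → Nat → Option Nat
  | [], _ => none
  | x :: xs, i => if x ≠ 0 then some i else firstOf xs (i + 1)

theorem bGo_eq (xs : List Int) (i : Nat) :
    bGo xs i = (termsOf xs i, firstOf xs i, xs.prod) := by
  induction xs generalizing i with
  | nil => simp [bGo, termsOf, firstOf]
  | cons x xs ih =>
      simp [bGo, termsOf, firstOf, ih, term, mul_comm]

theorem aFirst_eq (xs : List Int) (i : Nat) :
    aFirst xs i = (firstOf xs i).getD (i + xs.length) := by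
  induction xs generalizing i with
  | nil => simp [aFirst, firstOf]
  | cons x xs ih =>
      by_cases h : x = 0
      · rw [show aFirst (x :: xs) i = aFirst xs (i + 1) by simp [aFirst, h], ih,
            show firstOf (x :: xs) i = firstOf xs (i + 1) by simp [firstOf, h]]
        cases firstOf xs (i + 1) with
        | none => simp; omega
        | some g => rfl
      · simp [aFirst, firstOf, h]

theorem firstOf_bounds (xs : List Int) (i f : Nat) (h : firstOf xs i = some f) :
    i ≤ f ∧ f < i + xs.length := by
  induction xs generalizing i with
  | nil => simp [firstOf] at h
  | cons x xs ih =>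
      by_cases hx : x = 0
      · simp [firstOf, hx] at h
        have := ih (i + 1) h
        constructor <;> [omega; (simp; omega)]
      · simp [firstOf, hx] at h
        subst h
        simp

theorem aProd_eq (shape : List Int) (j : Nat) (size : Int) :
    aProd shape j shape.length size = size * (shape.drop j).prod := by
  by_cases h : j < shape.length
  · rw [aProd, if_pos h, aProd_eq shape (j + 1) (size * shape.getD j 0),
        List.drop_eq_getElem_cons h, List.prod_cons, List.getD_eq_getElem _ _ h]
    ring
  · rw [aProd, if_neg h, List.drop_eq_nil_of_le (by omega)]
    simp
termination_by shape.length - j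

theorem termsOf_drop (xs : List Int) (f i : Nat) :
    (termsOf xs i).drop f = termsOf (xs.drop f) (i + f) := by
  induction xs generalizing f i with
  | nil => simp [termsOf]
  | cons x xs ih =>
      cases f with
      | zero => simp [termsOf]
      | succ f =>
          simp only [termsOf, List.drop_succ_cons]
          rw [ih f (i + 1)]
          congr 1
          omega

theorem joinPlus_cons (a : String) (l : List String) (h : l ≠ []) :
    joinPlus (a :: l) = a ++ " + " ++ joinPlus l := by
  cases l with
  | nil => simp at h
  | cons b l => rfl

theorem aLoop_eq (shape : List Int) (i : Nat) (code : String)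
    (hi : i < shape.length) :
    aLoop shape i shape.length code = code ++ joinPlus (termsOf (shape.drop i) i) := by
  have hdrop : shape.drop i = shape[i] :: shape.drop (i + 1) :=
    List.drop_eq_getElem_cons hi
  rw [aLoop, if_pos hi]
  simp only [aProd_eq shape (i + 1) 1, one_mul]
  by_cases h : i + 1 < shape.length
  · have hne : termsOf (shape.drop (i + 1)) (i + 1) ≠ [] := by
      have hlen : shape.drop (i + 1) ≠ [] := by
        intro hc
        have := List.drop_eq_nil_iff.mp hc
        omega
      cases hx : shape.drop (i + 1) with
      | nil => exact absurd hx hlen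
      | cons y ys => simp [termsOf]
    have hc : ((i : Int) < (shape.length : Int) - 1) := by omega
    rw [if_pos hc, aLoop_eq shape (i + 1) _ h, hdrop]
    simp only [termsOf, term]
    rw [joinPlus_cons _ _ hne]
    simp [String.append_assoc]
  · have hc : ¬ ((i : Int) < (shape.length : Int) - 1) := by omega
    have hnil : shape.drop (i + 1) = [] := List.drop_eq_nil_of_le (by omega)
    rw [if_neg hc, aLoop, if_neg h, hdrop, hnil]
    simp [termsOf, term, joinPlus, String.append_assoc]
termination_by shape.length - i

-- ===== VERDICT (by name: the statement is the Claim_ definition above) =====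
theorem gen_for_loop_index_py_spec : Claim_equal_gen_for_loop_index_py := by
  intro shape _
  unfold Spec_gen_for_loop_index_py gen_for_loop_index_py gen_for_loop_index_py_alt
  rw [bGo_eq]
  cases hf : firstOf shape 0 with
  | none =>
      have : aFirst shape 0 = shape.length := by rw [aFirst_eq, hf]; simp
      simp [this]
  | some f =>
      have hb := firstOf_bounds shape 0 f hf
      have ha : aFirst shape 0 = f := by rw [aFirst_eq, hf]; rfl
      have hlt : f < shape.length := by omega
      simp only [ha, if_neg (by omega : ¬ f = shape.length)]
      rw [aLoop_eq shape f "" hlt, termsOf_drop]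
      simp
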